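-- pv_equiv track=rewrite | github.com/amilworks/ultra | src/science/chemistry.py | _conditions_to_classes
-- ===== SOURCE A (Python) =====
-- def _conditions_to_classes(conditions_text: str) -> list[str]:
--     text = str(conditions_text or "").lower()
--     classes: set[str] = set()
--     if any(token in text for token in ["pcc", "pdc", "dess-martin", "dmp", "swern", "jones", "cro3", "oxid"]):
--         classes.add("oxidation")
--     if any(token in text for token in ["nah", "lda", "dbu", "tbuok", "base", "alkoxide"]):
--         classes.add("base")
--     if any(token in text for token in ["h+", "acid", "h2so4", "tsoh", "hcl", "hbr", "bf3"]):
--         classes.add("acid")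
--     if any(token in text for token in ["h2o", "water", "aq", "hydrolysis"]):
--         classes.add("water")
--     if any(token in text for token in ["nabh4", "lah", "lialh4", "dibal", "h2", "pd/c", "pt", "raney"]):
--         classes.add("reduction")
--     if any(token in text for token in ["wittig", "ylide", "ph3p=ch2", "h2cpph3", "phosphorane"]):
--         classes.add("wittig")
--     if any(token in text for token in ["sn1", "sn2", "substitution"]):
--         classes.add("substitution")
--     if any(token in text for token in ["e1", "e2", "elimination", "dehydration"]):
--         classes.add("elimination")
--     return sorted(classes)
-- ===== SOURCE B (Python) =====
-- # Single left-to-right scan over text positions, matching all (token, class)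
-- # patterns as prefixes at each position (naive multi-pattern matcher), instead
-- # of a separate substring search per token.
-- _PATTERNS = [
--     ("pcc", "oxidation"), ("pdc", "oxidation"), ("dess-martin", "oxidation"),
--     ("dmp", "oxidation"), ("swern", "oxidation"), ("jones", "oxidation"),
--     ("cro3", "oxidation"), ("oxid", "oxidation"),
--     ("nah", "base"), ("lda", "base"), ("dbu", "base"), ("tbuok", "base"),
--     ("base", "base"), ("alkoxide", "base"),
--     ("h+", "acid"), ("acid", "acid"), ("h2so4", "acid"), ("tsoh", "acid"),
--     ("hcl", "acid"), ("hbr", "acid"), ("bf3", "acid"),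
--     ("h2o", "water"), ("water", "water"), ("aq", "water"), ("hydrolysis", "water"),
--     ("nabh4", "reduction"), ("lah", "reduction"), ("lialh4", "reduction"),
--     ("dibal", "reduction"), ("h2", "reduction"), ("pd/c", "reduction"),
--     ("pt", "reduction"), ("raney", "reduction"),
--     ("wittig", "wittig"), ("ylide", "wittig"), ("ph3p=ch2", "wittig"),
--     ("h2cpph3", "wittig"), ("phosphorane", "wittig"),
--     ("sn1", "substitution"), ("sn2", "substitution"), ("substitution", "substitution"),
--     ("e1", "elimination"), ("e2", "elimination"), ("elimination", "elimination"),
--     ("dehydration", "elimination"),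
-- ]
--
--
-- def _conditions_to_classes(conditions_text: str) -> list[str]:
--     text = str(conditions_text or "").lower()
--     found = set()
--     for i in range(len(text)):
--         for tok, cls in _PATTERNS:
--             if text.startswith(tok, i):
--                 found.add(cls)
--     return sorted(found)
-- ===== Notes on version B (the rewrite author's own statement) =====
-- stated objective: alternative
-- what changed: Replaces A's eight per-class blocks of whole-text substring searches (one 'token in text' scan per token) by a single left-to-right scan over text positions that tries all 45 (token, class) patterns as prefixes at each position, collecting matched classes in one pass (a naive multi-pattern matcher).
import Mathlib
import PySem

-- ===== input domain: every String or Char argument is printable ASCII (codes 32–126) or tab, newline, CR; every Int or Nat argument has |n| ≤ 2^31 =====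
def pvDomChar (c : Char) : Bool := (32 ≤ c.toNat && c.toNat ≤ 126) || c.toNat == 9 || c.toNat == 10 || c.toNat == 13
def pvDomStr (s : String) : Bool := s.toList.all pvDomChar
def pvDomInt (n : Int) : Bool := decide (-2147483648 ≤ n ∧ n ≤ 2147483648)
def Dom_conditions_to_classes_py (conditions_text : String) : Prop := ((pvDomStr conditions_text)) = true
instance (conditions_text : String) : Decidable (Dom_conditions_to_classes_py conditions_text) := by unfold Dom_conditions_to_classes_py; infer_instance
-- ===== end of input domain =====

-- B replaces A's eight per-class blocks of whole-text substring searches by a single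
-- left-to-right scan over text positions that matches all (token, class) patterns as
-- prefixes at each position (a naive multi-pattern matcher); objective: alternative.

-- ===== PORT A =====
-- any(token in text for token in tokens); sorted(classes) compares strings by code points,
-- which is exactly the lexicographic order of their character lists (key fun s => s.toList)
def pvAnyIn (text : String) (tokens : List String) : Bool :=
  tokens.any (fun t => PySem.Str.isIn t text)

def conditions_to_classes_py (conditions_text : String) : List String :=
  let text := PySem.Str.lower (if conditions_text == "" then "" else conditions_text)
  let classes : PySem.Set String := PySem.Set.ofList []
  let classes := if pvAnyIn text ["pcc", "pdc", "dess-martin", "dmp", "swern", "jones", "cro3", "oxid"] then PySem.Set.add classes "oxidation" else classes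
  let classes := if pvAnyIn text ["nah", "lda", "dbu", "tbuok", "base", "alkoxide"] then PySem.Set.add classes "base" else classes
  let classes := if pvAnyIn text ["h+", "acid", "h2so4", "tsoh", "hcl", "hbr", "bf3"] then PySem.Set.add classes "acid" else classes
  let classes := if pvAnyIn text ["h2o", "water", "aq", "hydrolysis"] then PySem.Set.add classes "water" else classes
  let classes := if pvAnyIn text ["nabh4", "lah", "lialh4", "dibal", "h2", "pd/c", "pt", "raney"] then PySem.Set.add classes "reduction" else classes
  let classes := if pvAnyIn text ["wittig", "ylide", "ph3p=ch2", "h2cpph3", "phosphorane"] then PySem.Set.add classes "wittig" else classes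
  let classes := if pvAnyIn text ["sn1", "sn2", "substitution"] then PySem.Set.add classes "substitution" else classes
  let classes := if pvAnyIn text ["e1", "e2", "elimination", "dehydration"] then PySem.Set.add classes "elimination" else classes
  PySem.List.sorted classes (fun s => s.toList) false

-- ===== PORT B =====
def pvPatterns : List (String × String) :=
  [ ("pcc", "oxidation"), ("pdc", "oxidation"), ("dess-martin", "oxidation"),
    ("dmp", "oxidation"), ("swern", "oxidation"), ("jones", "oxidation"),
    ("cro3", "oxidation"), ("oxid", "oxidation"),
    ("nah", "base"), ("lda", "base"), ("dbu", "base"), ("tbuok", "base"),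
    ("base", "base"), ("alkoxide", "base"),
    ("h+", "acid"), ("acid", "acid"), ("h2so4", "acid"), ("tsoh", "acid"),
    ("hcl", "acid"), ("hbr", "acid"), ("bf3", "acid"),
    ("h2o", "water"), ("water", "water"), ("aq", "water"), ("hydrolysis", "water"),
    ("nabh4", "reduction"), ("lah", "reduction"), ("lialh4", "reduction"),
    ("dibal", "reduction"), ("h2", "reduction"), ("pd/c", "reduction"),
    ("pt", "reduction"), ("raney", "reduction"),
    ("wittig", "wittig"), ("ylide", "wittig"), ("ph3p=ch2", "wittig"),
    ("h2cpph3", "wittig"), ("phosphorane", "wittig"),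
    ("sn1", "substitution"), ("sn2", "substitution"), ("substitution", "substitution"),
    ("e1", "elimination"), ("e2", "elimination"), ("elimination", "elimination"),
    ("dehydration", "elimination") ]

-- text.startswith(tok, i) for 0 ≤ i is exactly tok.toList.isPrefixOf (text.toList.drop i)
-- (Python compares text[i:i+len(tok)] with tok); range(len(text)) is List.range (length).
def conditions_to_classes_py_alt (conditions_text : String) : List String :=
  let text := PySem.Str.lower (if conditions_text == "" then "" else conditions_text)
  let cs := text.toList
  let found : PySem.Set String :=
    (List.range cs.length).foldl (fun fd i =>
      pvPatterns.foldl (fun fd2 p =>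
        if p.1.toList.isPrefixOf (cs.drop i) then PySem.Set.add fd2 p.2 else fd2) fd)
      (PySem.Set.ofList [])
  PySem.List.sorted found (fun s => s.toList) false

-- ===== PRECONDITION & SPEC =====
def Spec_conditions_to_classes_py (conditions_text : String) (out : List String) : Prop := out = conditions_to_classes_py_alt conditions_text
instance (conditions_text : String) (out : List String) : Decidable (Spec_conditions_to_classes_py conditions_text out) := by unfold Spec_conditions_to_classes_py; infer_instance

-- ===== CLAIM =====
def Claim_equal_conditions_to_classes_py : Prop := ∀ (conditions_text : String), Dom_conditions_to_classes_py conditions_text → Spec_conditions_to_classes_py conditions_text (conditions_to_classes_py conditions_text)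

-- ===== LEMMAS AND PROOFS =====

-- 'tok in text' holds iff tok prefix-matches at some position (nonempty tok)
lemma pv_isIn_iff_exists_pos (t cs : List Char) (ht : t ≠ []) :
    PySem.Chars.isIn t cs = true ↔ ∃ i < cs.length, t.isPrefixOf (cs.drop i) = true := by
  rw [PySem.Chars.isIn_iff_infix, List.infix_iff_prefix_suffix]
  constructor
  · rintro ⟨u, hp, hs⟩
    refine ⟨cs.length - u.length, ?_, ?_⟩
    · have hu : u ≠ [] := by rintro rfl; simp_all
      have h1 := hs.length_le
      have h2 : 0 < u.length := List.length_pos_iff.mpr hu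
      omega
    · rw [← List.suffix_iff_eq_drop.mp hs]
      exact List.isPrefixOf_iff_prefix.mpr hp
  · rintro ⟨i, hi, hp⟩
    exact ⟨cs.drop i, List.isPrefixOf_iff_prefix.mp hp, List.drop_suffix i cs⟩

-- every pattern token is nonempty
lemma pv_patterns_ne : ∀ p ∈ pvPatterns, p.1.toList ≠ [] := by decide

-- membership in A's conditional add
lemma pv_mem_addIf (c : Bool) (s : PySem.Set String) (y x : String) :
    (x ∈ (if c = true then PySem.Set.add s y else s)) ↔ x ∈ s ∨ (c = true ∧ x = y) := by
  by_cases hc : c = true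
  · simp [hc, PySem.Set.mem_add]
  · simp [hc]

-- membership after B's inner fold (one position, all patterns)
lemma pv_mem_inner (cs : List Char) (i : Nat) (x : String) :
    ∀ (l : List (String × String)) (fd : PySem.Set String),
    (x ∈ l.foldl (fun fd2 p =>
        if p.1.toList.isPrefixOf (cs.drop i) then PySem.Set.add fd2 p.2 else fd2) fd) ↔
      x ∈ fd ∨ ∃ p ∈ l, p.1.toList.isPrefixOf (cs.drop i) = true ∧ x = p.2 := by
  intro l
  induction l with
  | nil => simp
  | cons p rest ih =>
    intro fd
    rw [List.foldl_cons, ih]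
    by_cases hp : p.1.toList.isPrefixOf (cs.drop i) = true
    · rw [if_pos hp]
      simp only [PySem.Set.mem_add, List.exists_mem_cons_iff]
      tauto
    · rw [if_neg hp]
      simp only [List.exists_mem_cons_iff]
      tauto

-- membership after B's outer fold (all positions)
lemma pv_mem_outer (cs : List Char) (x : String) :
    ∀ (l : List Nat) (fd : PySem.Set String),
    (x ∈ l.foldl (fun fd i =>
        pvPatterns.foldl (fun fd2 p =>
          if p.1.toList.isPrefixOf (cs.drop i) then PySem.Set.add fd2 p.2 else fd2) fd) fd) ↔
      x ∈ fd ∨ ∃ i ∈ l, ∃ p ∈ pvPatterns, p.1.toList.isPrefixOf (cs.drop i) = true ∧ x = p.2 := by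
  intro l
  induction l with
  | nil => simp
  | cons j rest ih =>
    intro fd
    rw [List.foldl_cons, ih, pv_mem_inner]
    rw [List.exists_mem_cons_iff]
    exact or_assoc

-- B's inner fold preserves the set invariant
lemma pv_nodup_inner (cs : List Char) (i : Nat) :
    ∀ (l : List (String × String)) (fd : PySem.Set String), fd.Nodup →
    (l.foldl (fun fd2 p =>
        if p.1.toList.isPrefixOf (cs.drop i) then PySem.Set.add fd2 p.2 else fd2) fd).Nodup := by
  intro l
  induction l with
  | nil => intro fd h; simpa using h
  | cons p rest ih =>
    intro fd h
    by_cases hp : p.1.toList.isPrefixOf (cs.drop i) = true <;>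
      simp only [List.foldl_cons, hp, if_true, if_false, Bool.false_eq_true] <;>
      exact ih _ (by first | exact PySem.Set.nodup_add _ _ h | exact h)

lemma pv_nodup_outer (cs : List Char) :
    ∀ (l : List Nat) (fd : PySem.Set String), fd.Nodup →
    (l.foldl (fun fd i =>
        pvPatterns.foldl (fun fd2 p =>
          if p.1.toList.isPrefixOf (cs.drop i) then PySem.Set.add fd2 p.2 else fd2) fd) fd).Nodup := by
  intro l
  induction l with
  | nil => intro fd h; simpa using h
  | cons j rest ih => intro fd h; exact ih _ (pv_nodup_inner cs j _ fd h)

-- A's conditional add preserves Nodup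
lemma pv_nodup_addIf (c : Bool) (s : PySem.Set String) (y : String) (h : s.Nodup) :
    (if c = true then PySem.Set.add s y else s).Nodup := by
  by_cases hc : c = true <;> simp only [hc, if_true, if_false, Bool.false_eq_true]
  · exact PySem.Set.nodup_add _ _ h
  · exact h

-- ===== VERDICT =====
set_option maxHeartbeats 4000000 in
theorem conditions_to_classes_py_spec : Claim_equal_conditions_to_classes_py := by
  intro t _
  unfold Spec_conditions_to_classes_py conditions_to_classes_py conditions_to_classes_py_alt
  dsimp only
  set text := PySem.Str.lower (if t == "" then "" else t) with htext
  set cs := text.toList with hcs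
  rw [show (fun (a b : List Char) => a.decidableLT b) = (LinearOrder.toDecidableLT (α := List Char))
    from Subsingleton.elim _ _]
  apply PySem.List.sorted_eq_sorted_of_perm _ _ _ (fun a b h => String.toList_inj.mp h)
  refine (List.perm_ext_iff_of_nodup ?_ ?_).mpr ?_
  · repeat' apply pv_nodup_addIf
    exact List.nodup_nil
  · exact pv_nodup_outer cs (List.range cs.length) _ List.nodup_nil
  · intro x
    rw [pv_mem_outer cs x]
    have hB : (∃ i ∈ List.range cs.length, ∃ p ∈ pvPatterns,
        p.1.toList.isPrefixOf (cs.drop i) = true ∧ x = p.2) ↔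
        ∃ p ∈ pvPatterns, PySem.Chars.isIn p.1.toList cs = true ∧ x = p.2 := by
      constructor
      · rintro ⟨i, hi, p, hp, hpre, hx⟩
        exact ⟨p, hp, (pv_isIn_iff_exists_pos _ cs (pv_patterns_ne p hp)).mpr
          ⟨i, List.mem_range.mp hi, hpre⟩, hx⟩
      · rintro ⟨p, hp, hin, hx⟩
        obtain ⟨i, hi, hpre⟩ := (pv_isIn_iff_exists_pos _ cs (pv_patterns_ne p hp)).mp hin
        exact ⟨i, List.mem_range.mpr hi, p, hp, hpre, hx⟩
    rw [hB]
    simp only [pv_mem_addIf, PySem.Set.mem_ofList, List.not_mem_nil, false_or]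
    simp only [pvAnyIn, List.any_cons, List.any_nil, Bool.or_eq_true, Bool.false_eq_true, or_false,
      PySem.Str.isIn_eq, ← hcs,
      pvPatterns, List.mem_cons, exists_or, exists_eq_left, List.not_mem_nil, or_and_right, or_assoc]
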